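-- pv_equiv track=rewrite | github.com/nodematerial/abstructure | main/utils.py | construct_chemfig_expression
-- ===== SOURCE A (Python) =====
-- from collections import defaultdict
--
-- conv_table = {0:'[0]', 1:'[2]', 2:'[4]', 3:'[6]', 4:'[1]', 5:'[3]', 6:'[5]',
--             7:'[7]',8:'[:30]', 9:'[:60]', 10:'[:120]', 11:'[:150]', 12:'[:-150]',
--             13:'[:-120]', 14:'[:-60]', 15:'[:-30]'}
--
-- def construct_chemfig_expression(nodes, seq_cluster, direct_cluster):
--     chemlist = []
--     di = defaultdict(list)
--
--     for (_, __, atom) in nodes.values():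
--         chemlist.append(atom)
--
--     for i, seq in enumerate(seq_cluster):
--         di[seq[0]].append((seq[1], i))
--
--     for i in reversed(range(len(chemlist))):
--         root = i
--         branches = []
--         directions = []
--         for br, idx in di[i]:
--             branch = ''
--             brseq = seq_cluster[idx]
--             brdir = direct_cluster[idx]
--             for j in range(len(brseq)):
--                 if j == 0:
--                     pass
--                 else:
--                     direction = conv_table[brdir[j-1]]
--                     atom = chemlist[brseq[j]]
--                     branch += f'-{direction}{atom}'
--             branches.append(branch)
--             directions.append(brdir)
--         #direction = conv_table[direct_cluster[i][0]]
--         for (branch, direction) in zip(branches, directions):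
--             chemlist[root] +=  f'({branch})'
--     result = chemlist[0]
--     return result
-- ===== SOURCE B (Python) =====
-- from collections import defaultdict
--
-- conv_table = {0:'[0]', 1:'[2]', 2:'[4]', 3:'[6]', 4:'[1]', 5:'[3]', 6:'[5]',
--             7:'[7]',8:'[:30]', 9:'[:60]', 10:'[:120]', 11:'[:150]', 12:'[:-150]',
--             13:'[:-120]', 14:'[:-60]', 15:'[:-30]'}
--
-- def construct_chemfig_expression(nodes, seq_cluster, direct_cluster):
--     atoms = [atom for (_, _, atom) in nodes.values()]
--     children = defaultdict(list)
--     for idx, seq in enumerate(seq_cluster):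
--         children[seq[0]].append(idx)
--
--     def build(i):
--         parts = [atoms[i]]
--         for idx in children[i]:
--             inner = ''.join(f'-{conv_table[d]}{build(k)}'
--                             for d, k in zip(direct_cluster[idx], seq_cluster[idx][1:]))
--             parts.append(f'({inner})')
--         return ''.join(parts)
--
--     return build(0)
-- ===== Notes on version B (the rewrite author's own statement) =====
-- stated objective: alternative
-- what changed: A walks the flat atom list in reverse index order, mutating chemlist[i] in place and carrying a dead directions list; B builds the same string by a top-down recursion over the branch tree (root 0, children joined via zip of directions with seq[1:]), with no array mutation.
-- outside the precondition, e.g. on construct_chemfig_expression({'a': (0, 0, 'C')}, [[0, 0]], [[0]]): A returns 'C(-[0]C)', B raises RecursionError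
import Mathlib
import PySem

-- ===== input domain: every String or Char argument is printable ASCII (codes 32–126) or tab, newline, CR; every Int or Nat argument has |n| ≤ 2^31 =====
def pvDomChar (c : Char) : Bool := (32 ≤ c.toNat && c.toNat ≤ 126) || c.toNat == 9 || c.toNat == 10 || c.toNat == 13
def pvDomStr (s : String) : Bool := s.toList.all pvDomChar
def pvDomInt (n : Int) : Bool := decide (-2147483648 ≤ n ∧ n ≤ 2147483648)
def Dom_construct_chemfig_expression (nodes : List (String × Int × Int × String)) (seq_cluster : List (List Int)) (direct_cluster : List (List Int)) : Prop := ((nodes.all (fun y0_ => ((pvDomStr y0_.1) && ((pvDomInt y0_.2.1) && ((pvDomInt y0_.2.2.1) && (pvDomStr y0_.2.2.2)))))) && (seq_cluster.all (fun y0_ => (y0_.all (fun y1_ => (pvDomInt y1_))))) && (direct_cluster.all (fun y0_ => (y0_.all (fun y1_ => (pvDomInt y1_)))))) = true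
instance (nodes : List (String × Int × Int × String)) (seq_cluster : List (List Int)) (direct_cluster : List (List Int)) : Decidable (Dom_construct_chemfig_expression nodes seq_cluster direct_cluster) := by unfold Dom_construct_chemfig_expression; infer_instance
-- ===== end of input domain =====

-- B re-implements A's flat reverse-index array-mutation walk as a top-down recursion over
-- the branch tree (different decomposition, same cost); claimed on tree-shaped inputs (Pre_).

-- conv_table (module constant, shared by both sides)
def convTable : PySem.Dict Int String :=
  PySem.Dict.ofList [(0,"[0]"),(1,"[2]"),(2,"[4]"),(3,"[6]"),(4,"[1]"),(5,"[3]"),(6,"[5]"),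
    (7,"[7]"),(8,"[:30]"),(9,"[:60]"),(10,"[:120]"),(11,"[:150]"),(12,"[:-150]"),
    (13,"[:-120]"),(14,"[:-60]"),(15,"[:-30]")]

-- ===== PORT A =====
-- chemlist = [atom for (_, __, atom) in nodes.values()]
def aChemlist (nodes : List (String × Int × Int × String)) : List String :=
  (PySem.Dict.ofList nodes).values.map (fun v => v.2.2)

-- di[seq[0]].append((seq[1], i)) over enumerate(seq_cluster)
def aDi (seq_cluster : List (List Int)) : PySem.Dict Int (List (Int × Int)) :=
  (PySem.List.enumerate seq_cluster 0).foldl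
    (fun d p => d.modify (PySem.List.pyGetD p.2 0 0) []
        (fun l => l ++ [(PySem.List.pyGetD p.2 1 0, p.1)]))
    PySem.Dict.empty

-- the inner 'for j in range(len(brseq))' loop building one branch string
def aBranch (seq_cluster direct_cluster : List (List Int)) (chemlist : List String) (idx : Int) : String :=
  let brseq := PySem.List.pyGetD seq_cluster idx []
  let brdir := PySem.List.pyGetD direct_cluster idx []
  (PySem.List.pyRange 0 brseq.length 1).foldl
    (fun branch j =>
      if j == 0 then branch
      else branch ++ "-" ++ convTable.getD (PySem.List.pyGetD brdir (j-1) 0) ""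
                 ++ PySem.List.pyGetD chemlist (PySem.List.pyGetD brseq j 0) "")
    ""

-- body of 'for i in reversed(range(len(chemlist)))'
def aStep (seq_cluster direct_cluster : List (List Int)) (di : PySem.Dict Int (List (Int × Int)))
    (chemlist : List String) (i : Int) : List String :=
  let bd := (di.getD i []).foldl
    (fun (bd : List String × List (List Int)) p =>
      (bd.1 ++ [aBranch seq_cluster direct_cluster chemlist p.2],
       bd.2 ++ [PySem.List.pyGetD direct_cluster p.2 []]))
    ([], [])
  (bd.1.zip bd.2).foldl
    (fun cl bp => PySem.List.pySetD cl i (PySem.List.pyGetD cl i "" ++ "(" ++ bp.1 ++ ")"))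
    chemlist

def construct_chemfig_expression (nodes : List (String × Int × Int × String)) (seq_cluster : List (List Int)) (direct_cluster : List (List Int)) : String :=
  let chemlist := aChemlist nodes
  let di := aDi seq_cluster
  let final := (PySem.List.pyRange ((chemlist.length : Int) - 1) (-1) (-1)).foldl
      (aStep seq_cluster direct_cluster di) chemlist
  PySem.List.pyGetD final 0 ""

-- ===== PORT B =====
-- children[seq[0]].append(idx) over enumerate(seq_cluster)
def bKids (seq_cluster : List (List Int)) : PySem.Dict Int (List Int) :=
  (PySem.List.enumerate seq_cluster 0).foldl
    (fun d p => d.modify (PySem.List.pyGetD p.2 0 0) [] (fun l => l ++ [p.1]))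
    PySem.Dict.empty

-- def build(i): recursive; fuel only makes the recursion total (never exhausted under Pre_)
def bBuild (seq_cluster direct_cluster : List (List Int)) (kids : PySem.Dict Int (List Int))
    (atoms : List String) : Nat → Int → String
  | 0, _ => ""
  | fuel+1, i =>
    String.join ((kids.getD i []).foldl
      (fun parts idx =>
        let inner := ((PySem.List.pyGetD direct_cluster idx []).zip
            (PySem.List.slice (PySem.List.pyGetD seq_cluster idx []) (some 1) none)).foldl
          (fun s dk => s ++ "-" ++ convTable.getD dk.1 ""
                         ++ bBuild seq_cluster direct_cluster kids atoms fuel dk.2) ""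
        parts ++ ["(" ++ inner ++ ")"])
      [PySem.List.pyGetD atoms i ""])

def construct_chemfig_expression_alt (nodes : List (String × Int × Int × String)) (seq_cluster : List (List Int)) (direct_cluster : List (List Int)) : String :=
  let atoms := (PySem.Dict.ofList nodes).values.map (fun v => v.2.2)
  bBuild seq_cluster direct_cluster (bKids seq_cluster) atoms atoms.length 0

-- ===== PRECONDITION & SPEC =====
-- Pre_ excludes the inputs where A raises (empty node dict; a sequence shorter than 2; a
-- missing/short direction list or a direction outside conv_table for a sequence whose root is
-- an actual node) and, for such rooted sequences, branch references to an equal-or-lower or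
-- negative node index (non-tree data): there A's value is an artefact of its reverse
-- mutation order, and B's natural recursion diverges or expands the referenced node instead.
def Pre_construct_chemfig_expression (nodes : List (String × Int × Int × String)) (seq_cluster : List (List Int)) (direct_cluster : List (List Int)) : Prop :=
  0 < ((PySem.Dict.ofList nodes).size : Int) ∧ ∀ idx < seq_cluster.length,
    2 ≤ (seq_cluster.getD idx []).length ∧
    ((0 ≤ (seq_cluster.getD idx []).getD 0 0 ∧
      (seq_cluster.getD idx []).getD 0 0 < ((PySem.Dict.ofList nodes).size : Int)) →
      idx < direct_cluster.length ∧
      (seq_cluster.getD idx []).length - 1 ≤ (direct_cluster.getD idx []).length ∧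
      ∀ j < (seq_cluster.getD idx []).length, 0 < j →
        0 ≤ (direct_cluster.getD idx []).getD (j-1) 0 ∧
        (direct_cluster.getD idx []).getD (j-1) 0 ≤ 15 ∧
        (seq_cluster.getD idx []).getD 0 0 < (seq_cluster.getD idx []).getD j 0 ∧
        (seq_cluster.getD idx []).getD j 0 < ((PySem.Dict.ofList nodes).size : Int))

instance (nodes : List (String × Int × Int × String)) (seq_cluster : List (List Int)) (direct_cluster : List (List Int)) : Decidable (Pre_construct_chemfig_expression nodes seq_cluster direct_cluster) := by
  unfold Pre_construct_chemfig_expression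
  exact @instDecidableAnd _ _ inferInstance (@Nat.decidableBallLT _ _ (fun idx h => inferInstance))

def pvWitness_construct_chemfig_expression : (List (String × Int × Int × String)) × List (List Int) × List (List Int) :=
  ([("a", 0, 0, "C"), ("b", 0, 0, "O"), ("c", 0, 0, "N")], [[0, 1, 2]], [[0, 4]])

def Spec_construct_chemfig_expression (nodes : List (String × Int × Int × String)) (seq_cluster : List (List Int)) (direct_cluster : List (List Int)) (out : String) : Prop := out = construct_chemfig_expression_alt nodes seq_cluster direct_cluster
instance (nodes : List (String × Int × Int × String)) (seq_cluster : List (List Int)) (direct_cluster : List (List Int)) (out : String) : Decidable (Spec_construct_chemfig_expression nodes seq_cluster direct_cluster out) := by unfold Spec_construct_chemfig_expression; infer_instance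

-- ===== CLAIM (what is proved, stated in full; the proofs are below) =====
def Claim_equal_construct_chemfig_expression : Prop := ∀ (nodes : List (String × Int × Int × String)) (seq_cluster : List (List Int)) (direct_cluster : List (List Int)), Dom_construct_chemfig_expression nodes seq_cluster direct_cluster → Pre_construct_chemfig_expression nodes seq_cluster direct_cluster → Spec_construct_chemfig_expression nodes seq_cluster direct_cluster (construct_chemfig_expression nodes seq_cluster direct_cluster)

-- ===== LEMMAS AND PROOFS =====

-- ===== LEMMAS AND PROOFS =====

theorem pvFoldlAppendStr (l : List String) (x : String) :
    l.foldl (· ++ ·) x = x ++ l.foldl (· ++ ·) "" := by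
  induction l generalizing x with
  | nil => simp
  | cons a l ih =>
    simp only [List.foldl_cons]
    rw [ih (x ++ a), ih ("" ++ a), String.empty_append, String.append_assoc]

theorem pvJoinCons (x : String) (l : List String) :
    String.join (x :: l) = x ++ String.join l := by
  simp only [String.join, List.foldl_cons, String.empty_append]
  exact pvFoldlAppendStr l x

theorem pvStrFoldlAppend {α : Type} (l : List α) (g : α → String) (init : String) :
    l.foldl (fun s x => s ++ g x) init = init ++ String.join (l.map g) := by
  induction l generalizing init with
  | nil => simp [String.join]
  | cons a l ih =>
    simp only [List.foldl_cons, List.map_cons]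
    rw [ih, pvJoinCons, String.append_assoc]

-- indices whose sequence is rooted at k, in order
def rootIdxs (seq_cluster : List (List Int)) (k : Int) : List Int :=
  (PySem.List.pyRange 0 seq_cluster.length 1).filter
    (fun j => PySem.List.pyGetD (PySem.List.pyGetD seq_cluster j []) 0 0 == k)

theorem kids_getD (seq_cluster : List (List Int)) (k : Int) :
    (bKids seq_cluster).getD k [] = rootIdxs seq_cluster k := by
  unfold bKids
  rw [PySem.List.enumerate_eq_map_pyRange seq_cluster []]
  rw [List.foldl_map]
  have h2 := List.foldl_map
    (f := fun j : Int => (PySem.List.pyGetD (PySem.List.pyGetD seq_cluster j []) 0 0, j))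
    (g := fun (d : PySem.Dict Int (List Int)) (p : Int × Int) => d.modify p.1 [] (fun l => l ++ [p.2]))
    (l := PySem.List.pyRange 0 seq_cluster.length 1) (init := PySem.Dict.empty)
  simp only [PySem.List.len_eq] at h2 ⊢
  rw [← h2, PySem.Dict.getD_foldl_modify_append, PySem.Dict.getD_empty, List.nil_append,
    List.filter_map, List.map_map]
  simp [Function.comp_def, rootIdxs]

theorem di_getD (seq_cluster : List (List Int)) (k : Int) :
    (aDi seq_cluster).getD k [] = (rootIdxs seq_cluster k).map
      (fun j => (PySem.List.pyGetD (PySem.List.pyGetD seq_cluster j []) 1 0, j)) := by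
  unfold aDi
  rw [PySem.List.enumerate_eq_map_pyRange seq_cluster []]
  rw [List.foldl_map]
  have h2 := List.foldl_map
    (f := fun j : Int => (PySem.List.pyGetD (PySem.List.pyGetD seq_cluster j []) 0 0,
      (PySem.List.pyGetD (PySem.List.pyGetD seq_cluster j []) 1 0, j)))
    (g := fun (d : PySem.Dict Int (List (Int × Int))) (p : Int × (Int × Int)) => d.modify p.1 [] (fun l => l ++ [p.2]))
    (l := PySem.List.pyRange 0 seq_cluster.length 1) (init := PySem.Dict.empty)
  simp only [PySem.List.len_eq] at h2 ⊢
  rw [← h2, PySem.Dict.getD_foldl_modify_append, PySem.Dict.getD_empty, List.nil_append,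
    List.filter_map, List.map_map]
  simp [Function.comp_def, rootIdxs]

theorem mem_rootIdxs {seq_cluster : List (List Int)} {k j : Int}
    (h : j ∈ rootIdxs seq_cluster k) :
    0 ≤ j ∧ j < seq_cluster.length ∧ PySem.List.pyGetD (PySem.List.pyGetD seq_cluster j []) 0 0 = k := by
  unfold rootIdxs at h
  have := List.of_mem_filter h
  have hm := List.mem_of_mem_filter h
  rw [PySem.List.mem_pyRange_one] at hm
  simp only [beq_iff_eq] at this
  exact ⟨hm.1, hm.2, this⟩

theorem bBuild_succ (seq_cluster direct_cluster : List (List Int)) (kids : PySem.Dict Int (List Int))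
    (atoms : List String) (fuel : Nat) (i : Int) :
    bBuild seq_cluster direct_cluster kids atoms (fuel+1) i =
      PySem.List.pyGetD atoms i "" ++ String.join ((kids.getD i []).map (fun idx =>
        "(" ++ (String.join (((PySem.List.pyGetD direct_cluster idx []).zip
            (PySem.List.pyGetD seq_cluster idx []).tail).map
          (fun dk => "-" ++ (convTable.getD dk.1 "" ++
            bBuild seq_cluster direct_cluster kids atoms fuel dk.2))) ++ ")"))) := by
  show String.join _ = _
  rw [show ∀ l : List Int, l.foldl
      (fun parts idx =>
        parts ++ [ "(" ++ (((PySem.List.pyGetD direct_cluster idx []).zip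
            (PySem.List.slice (PySem.List.pyGetD seq_cluster idx []) (some 1) none)).foldl
          (fun s dk => s ++ "-" ++ convTable.getD dk.1 ""
                         ++ bBuild seq_cluster direct_cluster kids atoms fuel dk.2) "") ++ ")"])
      [PySem.List.pyGetD atoms i ""] =
      [PySem.List.pyGetD atoms i ""] ++ l.map (fun idx =>
        "(" ++ (((PySem.List.pyGetD direct_cluster idx []).zip
            (PySem.List.slice (PySem.List.pyGetD seq_cluster idx []) (some 1) none)).foldl
          (fun s dk => s ++ "-" ++ convTable.getD dk.1 ""
                         ++ bBuild seq_cluster direct_cluster kids atoms fuel dk.2) "") ++ ")")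
      from fun l => PySem.List.foldl_append_singleton_eq_map _ l _]
  rw [List.singleton_append, pvJoinCons]
  congr 1
  congr 1
  apply List.map_congr_left
  intro idx _
  rw [PySem.List.slice_from_one]
  have : ((PySem.List.pyGetD direct_cluster idx []).zip
      (PySem.List.pyGetD seq_cluster idx []).tail).foldl
      (fun s dk => s ++ "-" ++ convTable.getD dk.1 ""
        ++ bBuild seq_cluster direct_cluster kids atoms fuel dk.2) "" =
      ((PySem.List.pyGetD direct_cluster idx []).zip
      (PySem.List.pyGetD seq_cluster idx []).tail).foldl
      (fun s dk => s ++ ("-" ++ (convTable.getD dk.1 ""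
        ++ bBuild seq_cluster direct_cluster kids atoms fuel dk.2))) "" := by
    apply PySem.List.foldl_congr_mem
    intro acc x _
    rw [String.append_assoc, String.append_assoc]
  rw [this, pvStrFoldlAppend, String.empty_append, String.append_assoc]

theorem aBranch_norm (seq_cluster direct_cluster : List (List Int)) (chemlist : List String)
    (idx : Int) (hL : 0 < (PySem.List.pyGetD seq_cluster idx []).length) :
    aBranch seq_cluster direct_cluster chemlist idx =
      String.join ((PySem.List.pyRange 1 (PySem.List.pyGetD seq_cluster idx []).length).map
        (fun j => "-" ++ (convTable.getD (PySem.List.pyGetD (PySem.List.pyGetD direct_cluster idx []) (j-1) 0) "" ++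
          PySem.List.pyGetD chemlist (PySem.List.pyGetD (PySem.List.pyGetD seq_cluster idx []) j 0) ""))) := by
  unfold aBranch
  dsimp only
  rw [PySem.List.pyRange_one_cons (a := 0) (by exact_mod_cast hL)]
  rw [List.foldl_cons]
  simp only [beq_self_eq_true, if_true, zero_add]
  have : (PySem.List.pyRange 1 ((PySem.List.pyGetD seq_cluster idx []).length : Int)).foldl
      (fun branch j =>
        if j == 0 then branch
        else branch ++ "-" ++ convTable.getD (PySem.List.pyGetD (PySem.List.pyGetD direct_cluster idx []) (j-1) 0) ""
                   ++ PySem.List.pyGetD chemlist (PySem.List.pyGetD (PySem.List.pyGetD seq_cluster idx []) j 0) "") "" =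
      (PySem.List.pyRange 1 ((PySem.List.pyGetD seq_cluster idx []).length : Int)).foldl
      (fun branch j =>
        branch ++ ("-" ++ (convTable.getD (PySem.List.pyGetD (PySem.List.pyGetD direct_cluster idx []) (j-1) 0) ""
                   ++ PySem.List.pyGetD chemlist (PySem.List.pyGetD (PySem.List.pyGetD seq_cluster idx []) j 0) ""))) "" := by
    apply PySem.List.foldl_congr_mem
    intro acc x hx
    rw [PySem.List.mem_pyRange_one] at hx
    have : (x == 0) = false := by simp; omega
    rw [this]
    simp only [Bool.false_eq_true, if_false, String.append_assoc]
  rw [this, pvStrFoldlAppend, String.empty_append]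

theorem set_fold (l : List (String × List Int)) (arr : List String) (i : Nat) (hi : i < arr.length) :
    l.foldl (fun cl bp => PySem.List.pySetD cl (i : Int) (PySem.List.pyGetD cl (i : Int) "" ++ "(" ++ bp.1 ++ ")")) arr
      = arr.set i (arr.getD i "" ++ String.join (l.map (fun bp => "(" ++ bp.1 ++ ")"))) := by
  induction l generalizing arr with
  | nil =>
    simp only [List.foldl_nil, List.map_nil]
    rw [show String.join [] = "" from rfl, String.append_empty,
      List.getD_eq_getElem _ _ hi, List.set_getElem_self]
  | cons bp l ih =>
    simp only [List.foldl_cons, List.map_cons]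
    rw [PySem.List.pySetD_natCast, PySem.List.pyGetD_natCast]
    rw [ih _ (by simpa using hi)]
    rw [List.set_set]
    congr 1
    rw [List.getD_eq_getElem _ _ (by simpa using hi), List.getElem_set_self, pvJoinCons]
    simp [String.append_assoc]

theorem aChemlist_length (nodes : List (String × Int × Int × String)) :
    (aChemlist nodes).length = (PySem.Dict.ofList nodes).size := by
  simp [aChemlist, PySem.Dict.values, PySem.Dict.size]

-- the facts Pre_ provides about every sequence rooted at an actual node k < n
def TreeOK (n : Nat) (seq_cluster direct_cluster : List (List Int)) : Prop :=
  ∀ (k : Nat), k < n → ∀ j ∈ rootIdxs seq_cluster (k : Int),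
    2 ≤ (PySem.List.pyGetD seq_cluster j []).length ∧
    (PySem.List.pyGetD seq_cluster j []).length - 1 ≤ (PySem.List.pyGetD direct_cluster j []).length ∧
    ∀ (t : Nat), t + 1 < (PySem.List.pyGetD seq_cluster j []).length →
      (k : Int) < (PySem.List.pyGetD seq_cluster j []).getD (t+1) 0 ∧
      (PySem.List.pyGetD seq_cluster j []).getD (t+1) 0 < (n : Int)

theorem pre_treeOK (nodes : List (String × Int × Int × String))
    (seq_cluster direct_cluster : List (List Int))
    (hPre : Pre_construct_chemfig_expression nodes seq_cluster direct_cluster) :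
    TreeOK (aChemlist nodes).length seq_cluster direct_cluster := by
  intro k hk j hj
  obtain ⟨hj0, hjlen, hroot⟩ := mem_rootIdxs hj
  set m := j.toNat with hm
  have hjm : j = (m : Int) := by omega
  have hmlen : m < seq_cluster.length := by omega
  have hseq : PySem.List.pyGetD seq_cluster j [] = seq_cluster.getD m [] := by
    rw [hjm, PySem.List.pyGetD_natCast]
  have hdir : PySem.List.pyGetD direct_cluster j [] = direct_cluster.getD m [] := by
    rw [hjm, PySem.List.pyGetD_natCast]
  obtain ⟨-, hAll⟩ := hPre
  obtain ⟨hlen2, himp⟩ := hAll m hmlen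
  have hn : ((PySem.Dict.ofList nodes).size : Int) = ((aChemlist nodes).length : Int) := by
    rw [aChemlist_length]
  have hroot' : (seq_cluster.getD m []).getD 0 0 = (k : Int) := by
    rw [← hroot, hseq, PySem.List.pyGetD_zero]
  have hcond : (0 : Int) ≤ (seq_cluster.getD m []).getD 0 0 ∧
      (seq_cluster.getD m []).getD 0 0 < ((PySem.Dict.ofList nodes).size : Int) := by
    constructor
    · rw [hroot']; exact_mod_cast Int.natCast_nonneg k
    · rw [hroot', hn]; exact_mod_cast hk
  obtain ⟨-, hdl, hjj⟩ := himp hcond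
  refine ⟨by rw [hseq]; exact hlen2, by rw [hseq, hdir]; exact hdl, ?_⟩
  intro t ht
  rw [hseq] at ht ⊢
  obtain ⟨-, -, h3, h4⟩ := hjj (t+1) ht (by omega)
  constructor
  · rw [← hroot']; exact h3
  · rw [← hn]; exact h4

theorem bBuild_fuel (seq_cluster direct_cluster : List (List Int)) (atoms : List String)
    (hT : TreeOK atoms.length seq_cluster direct_cluster) :
    ∀ (d k f1 f2 : Nat), k < atoms.length → atoms.length - k ≤ d →
      atoms.length - k ≤ f1 → atoms.length - k ≤ f2 →
      bBuild seq_cluster direct_cluster (bKids seq_cluster) atoms f1 (k : Int) =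
      bBuild seq_cluster direct_cluster (bKids seq_cluster) atoms f2 (k : Int) := by
  intro d
  induction d with
  | zero => intro k f1 f2 hk hd _ _; omega
  | succ d ih =>
    intro k f1 f2 hk hd h1 h2
    obtain ⟨f1', rfl⟩ : ∃ f1', f1 = f1' + 1 := ⟨f1 - 1, by omega⟩
    obtain ⟨f2', rfl⟩ : ∃ f2', f2 = f2' + 1 := ⟨f2 - 1, by omega⟩
    rw [bBuild_succ, bBuild_succ]
    congr 2
    apply List.map_congr_left
    intro j hj
    rw [kids_getD] at hj
    obtain ⟨h2seq, hdlen, hch⟩ := hT k hk j hj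
    congr 2
    congr 1
    apply List.map_congr_left
    intro dk hdk
    have hsnd : dk.2 ∈ (PySem.List.pyGetD seq_cluster j []).tail := (List.of_mem_zip hdk).2
    obtain ⟨t, ht, hdk2⟩ := List.mem_iff_getElem.mp hsnd
    have ht' : t + 1 < (PySem.List.pyGetD seq_cluster j []).length := by
      have hlt := List.length_tail (l := PySem.List.pyGetD seq_cluster j [])
      omega
    have hdk2' : dk.2 = (PySem.List.pyGetD seq_cluster j []).getD (t+1) 0 := by
      rw [List.getD_eq_getElem _ _ ht', ← List.getElem_tail (by simpa using ht), hdk2]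
    obtain ⟨hlo, hhi⟩ := hch t ht'
    rw [← hdk2'] at hlo hhi
    have hnn : (0:Int) ≤ dk.2 := le_trans (Int.natCast_nonneg k) (le_of_lt hlo)
    set c := dk.2.toNat with hc
    have hcast : dk.2 = (c : Int) := by omega
    have hck : k < c := by omega
    have hcn : c < atoms.length := by omega
    have hrec := ih c f1' f2' hcn (by omega) (by omega) (by omega)
    rw [hcast, hrec]

theorem pyRange_snoc (n i : Nat) (h : i < n) :
    PySem.List.pyRange ((n : Int) - 1) ((i : Int) - 1) (-1) =
      PySem.List.pyRange ((n : Int) - 1) (i : Int) (-1) ++ [(i : Int)] := by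
  rw [PySem.List.pyRange_neg_one_eq_reverse, PySem.List.pyRange_neg_one_eq_reverse]
  have e1 : ((i : Int) - 1) + 1 = (i : Int) := by ring
  have e2 : ((n : Int) - 1) + 1 = (n : Int) := by ring
  rw [e1, e2]
  rw [PySem.List.pyRange_one_cons (by exact_mod_cast h), List.reverse_cons]

theorem aStep_eq (seq_cluster direct_cluster : List (List Int)) (arr : List String)
    (i : Nat) (hi : i < arr.length) :
    aStep seq_cluster direct_cluster (aDi seq_cluster) arr (i : Int) =
      arr.set i (arr.getD i "" ++ String.join ((rootIdxs seq_cluster (i : Int)).map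
        (fun j => "(" ++ aBranch seq_cluster direct_cluster arr j ++ ")"))) := by
  unfold aStep
  dsimp only
  rw [PySem.List.foldl_prod_mk
    (f := fun (a : List String) (p : Int × Int) => a ++ [aBranch seq_cluster direct_cluster arr p.2])
    (g := fun (b : List (List Int)) (p : Int × Int) => b ++ [PySem.List.pyGetD direct_cluster p.2 []])]
  rw [PySem.List.foldl_append_singleton_eq_map (fun p : Int × Int => aBranch seq_cluster direct_cluster arr p.2),
      PySem.List.foldl_append_singleton_eq_map (fun p : Int × Int => PySem.List.pyGetD direct_cluster p.2 [])]
  rw [List.nil_append, List.nil_append, List.zip_map']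
  rw [set_fold _ _ _ hi]
  rw [List.map_map, di_getD, List.map_map]
  simp [Function.comp_def]

theorem main_inv (nodes : List (String × Int × Int × String))
    (seq_cluster direct_cluster : List (List Int))
    (hPre : Pre_construct_chemfig_expression nodes seq_cluster direct_cluster) :
    ∀ (m i : Nat), i ≤ (aChemlist nodes).length → (aChemlist nodes).length - i = m →
      ((PySem.List.pyRange (((aChemlist nodes).length : Int) - 1) ((i : Int) - 1) (-1)).foldl
          (aStep seq_cluster direct_cluster (aDi seq_cluster)) (aChemlist nodes)).length
        = (aChemlist nodes).length ∧
      ∀ (k : Nat), k < (aChemlist nodes).length →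
        ((PySem.List.pyRange (((aChemlist nodes).length : Int) - 1) ((i : Int) - 1) (-1)).foldl
            (aStep seq_cluster direct_cluster (aDi seq_cluster)) (aChemlist nodes)).getD k ""
          = if i ≤ k then
              bBuild seq_cluster direct_cluster (bKids seq_cluster) (aChemlist nodes)
                ((aChemlist nodes).length - k) (k : Int)
            else (aChemlist nodes).getD k "" := by
  set atoms := aChemlist nodes with hatoms
  set n := atoms.length with hn
  have hT : TreeOK n seq_cluster direct_cluster := pre_treeOK nodes seq_cluster direct_cluster hPre
  intro m
  induction m with
  | zero =>
    intro i hi hm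
    have hin : i = n := by omega
    subst hin
    rw [PySem.List.pyRange_neg_one_eq_nil (by omega)]
    refine ⟨rfl, ?_⟩
    intro k hk
    rw [if_neg (by omega), List.foldl_nil]
  | succ m ih =>
    intro i hi hm
    have hilt : i < n := by omega
    obtain ⟨ihlen, ihval⟩ := ih (i+1) (by omega) (by omega)
    have hsp : ((i + 1 : Nat) : Int) - 1 = (i : Int) := by push_cast; ring
    rw [hsp] at ihlen ihval
    rw [pyRange_snoc n i hilt, List.foldl_append, List.foldl_cons, List.foldl_nil]
    rw [aStep_eq _ _ _ i (by rw [ihlen]; omega)]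
    constructor
    · rw [List.length_set]; exact ihlen
    intro k hk
    by_cases hki : k = i
    · subst hki
      rw [List.getD_eq_getElem _ _ (by rw [List.length_set, ihlen]; omega),
          List.getElem_set_self, if_pos (le_refl k)]
      have hnk : n - k = (n - k - 1) + 1 := by omega
      rw [hnk, bBuild_succ]
      have hak := ihval k hk
      rw [if_neg (by omega)] at hak
      rw [hak, PySem.List.pyGetD_natCast]
      congr 1
      congr 1
      rw [kids_getD]
      apply List.map_congr_left
      intro j hj
      obtain ⟨h2seq, hdlen, hch⟩ := hT k hk j hj
      rw [aBranch_norm _ _ _ _ (by omega), String.append_assoc]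
      congr 3
      apply List.ext_getElem
      · rw [List.length_map, List.length_map, PySem.List.length_pyRange_one,
          List.length_zip, List.length_tail]
        omega
      intro t ht1 ht2
      rw [List.getElem_map, List.getElem_map, List.getElem_zip, List.getElem_tail]
      rw [PySem.List.getElem_pyRange_one]
      have htlen : t < (PySem.List.pyGetD seq_cluster j []).length - 1 := by
        rw [List.length_map, PySem.List.length_pyRange_one] at ht1
        omega
      have e1 : (1 : Int) + (t : Int) - 1 = (t : Int) := by ring
      have e2 : (1 : Int) + (t : Int) = ((t + 1 : Nat) : Int) := by push_cast; ring
      rw [e1, e2, PySem.List.pyGetD_natCast, PySem.List.pyGetD_natCast]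
      have hdg : (PySem.List.pyGetD direct_cluster j []).getD t 0 =
          (PySem.List.pyGetD direct_cluster j [])[t]'(by omega) :=
        List.getD_eq_getElem _ _ (by omega)
      have hsg : (PySem.List.pyGetD seq_cluster j []).getD (t+1) 0 =
          (PySem.List.pyGetD seq_cluster j [])[t+1]'(by omega) :=
        List.getD_eq_getElem _ _ (by omega)
      rw [hdg, hsg]
      obtain ⟨hclo, hchi⟩ := hch t (by omega)
      rw [hsg] at hclo hchi
      set c : Int := (PySem.List.pyGetD seq_cluster j [])[t+1]'(by omega) with hc
      have hc0 : (0 : Int) ≤ c := le_trans (Int.natCast_nonneg k) (le_of_lt hclo)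
      have hcc : c = ((c.toNat : Nat) : Int) := by omega
      have hik : k + 1 ≤ c.toNat := by omega
      have hcn : c.toNat < n := by omega
      have harrc := ihval c.toNat hcn
      rw [if_pos hik] at harrc
      rw [PySem.List.pyGetD_of_nonneg _ _ hc0, harrc,
        bBuild_fuel seq_cluster direct_cluster atoms hT (n - c.toNat) c.toNat (n - c.toNat) (n - k - 1)
          hcn (le_refl _) (le_refl _) (by omega)]
      simp [← hcc]
    · rw [List.getD_eq_getElem _ _ (by rw [List.length_set, ihlen]; omega),
        List.getElem_set_ne (by omega)]
      have := ihval k hk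
      rw [← List.getD_eq_getElem _ _ (by rw [ihlen]; omega), this]
      by_cases hik : i ≤ k
      · rw [if_pos hik, if_pos (by omega)]
      · rw [if_neg hik, if_neg (by omega)]

-- ===== VERDICT (by name: the statement is the Claim_ definition above) =====
theorem construct_chemfig_expression_spec : Claim_equal_construct_chemfig_expression := by
  intro nodes seq_cluster direct_cluster _hDom hPre
  unfold Spec_construct_chemfig_expression
  have hn0 : 0 < (aChemlist nodes).length := by
    rw [aChemlist_length]
    exact_mod_cast hPre.1
  obtain ⟨-, hval⟩ := main_inv nodes seq_cluster direct_cluster hPre ((aChemlist nodes).length) 0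
    (by omega) (by omega)
  have h0 := hval 0 hn0
  rw [if_pos (le_refl 0)] at h0
  show PySem.List.pyGetD _ 0 "" = _
  rw [PySem.List.pyGetD_zero]
  have e0 : ((0 : Nat) : Int) - 1 = (-1 : Int) := by norm_num
  rw [e0] at h0
  unfold construct_chemfig_expression_alt
  rw [h0]
  simp [aChemlist]
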